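-- pv_equiv track=rewrite | github.com/itsannhienjoy/Sudoku | app.py | single_candidate
-- ===== SOURCE A (Python) =====
-- def get_influencers(y, x):
--     """Returns a list of coordinates of all squares directly involved with the considered square"""
--     influencers = []
--     for f in get_row_neighbours, get_column_neighbours, get_square_neighbours:
--         influencers += f(y, x)
--     return influencers
--
-- def get_row_neighbours(y, x, width = 9):
--     """Returns a list of coordinates for the other squares in a row"""
--     return [(y,i) for i in range(width) if i != x]
--
-- def get_column_neighbours(y, x, height = 9):
--     """Returns a list of coordinates for the other squares in a column"""
--     return [(j,x) for j in range(height) if j != y]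
--
-- def get_square_neighbours(y, x, height = 9, width = 9):
--     """Returns a list of coordinates for the other squares in a small square"""
--     x_range, y_range = (x // 3) * 3 , (y // 3) * 3
--     return [(j+y_range, i+x_range) for j in range(3) for i in range(3) if not (i+x_range == x and j+y_range == y)]
--
-- def single_candidate(puzzle, candidates, changed = False):
--     """Write down every candidates for every single square on the board
--     If there's only one candidate, fill that square with the number"""
--     deletion_list = []
--     for (y,x) in candidates:
--         influencers = set([puzzle[j][i] for (j,i) in get_influencers(y,x) if puzzle[j][i] != '.'])
--         candidates[(y,x)] -= influencers
--         if len(candidates[(y,x)]) == 1: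
--             puzzle[y][x] = list(candidates[(y,x)])[0]
--             changed = True; deletion_list.append((y, x))
--     for square in deletion_list: del candidates[square]
--     return puzzle, candidates, changed
-- ===== SOURCE B (Python) =====
-- def single_candidate(puzzle, candidates, changed=False):
--     """Same single-candidate step, but the used digits of every row, column and
--     box are indexed once up front and maintained incrementally, instead of
--     rebuilding a 24-cell influencer set for every candidate square.
--     (Mutates puzzle and the candidate sets in place like the original, but
--     returns a fresh candidates dict instead of deleting from the given one.)"""
--     if not candidates:
--         return puzzle, {}, changed
--     row_used = [set(v for v in row[:9] if v != '.') for row in puzzle[:9]]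
--     col_used = [set(puzzle[j][x] for j in range(9) if puzzle[j][x] != '.')
--                 for x in range(9)]
--     box_used = [set(puzzle[(b // 3) * 3 + j][(b % 3) * 3 + i]
--                     for j in range(3) for i in range(3)
--                     if puzzle[(b // 3) * 3 + j][(b % 3) * 3 + i] != '.')
--                 for b in range(9)]
--     new_candidates = {}
--     for (y, x), cand in candidates.items():
--         b = (y // 3) * 3 + x // 3
--         cand -= row_used[y]
--         cand -= col_used[x]
--         cand -= box_used[b]
--         if len(cand) == 1:
--             v = next(iter(cand))
--             puzzle[y][x] = v
--             row_used[y].add(v)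
--             col_used[x].add(v)
--             box_used[b].add(v)
--             changed = True
--         else:
--             new_candidates[(y, x)] = cand
--     return puzzle, new_candidates, changed
-- ===== Notes on version B (the rewrite author's own statement) =====
-- stated objective: alternative
-- what changed: B builds three row/column/box used-digit indexes in one pass over the board and maintains them incrementally as singles are filled, instead of rebuilding a 24-coordinate influencer list and scanning the board for every candidate; it also collects surviving candidates into a fresh dict instead of a deletion list plus dict deletions.
import Mathlib
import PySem

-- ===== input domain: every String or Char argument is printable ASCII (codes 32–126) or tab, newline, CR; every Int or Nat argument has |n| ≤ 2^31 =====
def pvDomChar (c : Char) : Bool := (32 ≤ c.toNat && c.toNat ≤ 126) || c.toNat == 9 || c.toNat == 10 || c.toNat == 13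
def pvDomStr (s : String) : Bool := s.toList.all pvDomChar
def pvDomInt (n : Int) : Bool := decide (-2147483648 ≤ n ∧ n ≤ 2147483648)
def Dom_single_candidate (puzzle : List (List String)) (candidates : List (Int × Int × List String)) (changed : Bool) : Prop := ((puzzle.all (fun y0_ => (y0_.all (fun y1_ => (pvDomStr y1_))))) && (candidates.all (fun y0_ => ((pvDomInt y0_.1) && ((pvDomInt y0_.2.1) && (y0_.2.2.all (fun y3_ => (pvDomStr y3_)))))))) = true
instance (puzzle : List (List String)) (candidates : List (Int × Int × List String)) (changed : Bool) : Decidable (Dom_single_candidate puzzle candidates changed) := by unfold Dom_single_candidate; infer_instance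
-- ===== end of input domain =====

-- B replaces A's per-candidate 24-cell influencer scan by row/column/box used-digit sets built once and
-- maintained incrementally (objective: alternative). Equivalence is about the RETURN value: both Pythons
-- mutate puzzle and the candidate sets in place, but A deletes solved keys from the given candidates
-- dict while B returns a fresh dict of the kept entries.

-- ===== PORT A =====
-- puzzle[j][i] and puzzle[y][x] = v; total pyGetD/pySetD forms, exact under Pre_ (indices in range)
def pvCell (p : List (List String)) (j i : Int) : String :=
  PySem.List.pyGetD (PySem.List.pyGetD p j []) i ""

def pvSetCell (p : List (List String)) (y x : Int) (v : String) : List (List String) :=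
  PySem.List.pySetD p y (PySem.List.pySetD (PySem.List.pyGetD p y []) x v)

def get_row_neighbours (y x width : Int) : List (Int × Int) :=
  ((PySem.List.pyRange 0 width 1).filter (fun i => !(i == x))).map (fun i => (y, i))

def get_column_neighbours (y x height : Int) : List (Int × Int) :=
  ((PySem.List.pyRange 0 height 1).filter (fun j => !(j == y))).map (fun j => (j, x))

def get_square_neighbours (y x _height _width : Int) : List (Int × Int) :=
  let x_range := PySem.Int.floordiv x 3 * 3
  let y_range := PySem.Int.floordiv y 3 * 3
  (PySem.List.pyRange 0 3 1).flatMap (fun j =>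
    ((PySem.List.pyRange 0 3 1).filter (fun i => !(i + x_range == x && j + y_range == y))).map
      (fun i => (j + y_range, i + x_range)))

def get_influencers (y x : Int) : List (Int × Int) :=
  get_row_neighbours y x 9 ++ get_column_neighbours y x 9 ++ get_square_neighbours y x 9 9

-- set([puzzle[j][i] for (j,i) in get_influencers(y,x) if puzzle[j][i] != '.'])
def pvInfl (p : List (List String)) (y x : Int) : PySem.Set String :=
  PySem.Set.ofList (((get_influencers y x).filter (fun c => !(pvCell p c.1 c.2 == "."))).map
    (fun c => pvCell p c.1 c.2))

-- the body of A's `for (y,x) in candidates:` loop; state = (puzzle, candidates dict, changed, deletion_list)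
def pvStepA (st : List (List String) × PySem.Dict (Int × Int) (List String) × Bool × List (Int × Int))
    (k : Int × Int) :
    List (List String) × PySem.Dict (Int × Int) (List String) × Bool × List (Int × Int) :=
  match st with
  | (p, d, chg, dels) =>
    let infl := pvInfl p k.1 k.2
    let d' := d.modify k [] (fun s => PySem.Set.diff s infl)
    let cur := d'.getD k []
    if PySem.Set.len cur == 1 then
      (pvSetCell p k.1 k.2 (PySem.List.pyGetD cur 0 ""), d', true, dels ++ [k])
    else (p, d', chg, dels)

def single_candidate (puzzle : List (List String)) (candidates : List (Int × Int × List String)) (changed : Bool) : List (List String) × (List (Int × Int × List String)) × Bool :=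
  let d0 : PySem.Dict (Int × Int) (List String) :=
    PySem.Dict.ofList (candidates.map (fun t => ((t.1, t.2.1), t.2.2)))
  let st := d0.keys.foldl pvStepA (puzzle, d0, changed, [])
  let d1 := st.2.2.2.foldl PySem.Dict.erase st.2.1
  (st.1, d1.items.map (fun e => (e.1.1, e.1.2, e.2)), st.2.2.1)

-- ===== PORT B =====
def pvBox (y x : Int) : Int := PySem.Int.floordiv y 3 * 3 + PySem.Int.floordiv x 3

-- [set(v for v in row[:9] if v != '.') for row in puzzle[:9]]
def pvRowUsed (p : List (List String)) : List (PySem.Set String) :=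
  (PySem.List.slice p none (some 9)).map (fun row =>
    PySem.Set.ofList ((PySem.List.slice row none (some 9)).filter (fun v => !(v == "."))))

-- [set(puzzle[j][x] for j in range(9) if puzzle[j][x] != '.') for x in range(9)]
def pvColUsed (p : List (List String)) : List (PySem.Set String) :=
  (PySem.List.pyRange 0 9 1).map (fun x =>
    PySem.Set.ofList (((PySem.List.pyRange 0 9 1).filter (fun j => !(pvCell p j x == "."))).map
      (fun j => pvCell p j x)))

-- [set(puzzle[(b//3)*3+j][(b%3)*3+i] for j in range(3) for i in range(3) if … != '.') for b in range(9)]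
def pvBoxUsed (p : List (List String)) : List (PySem.Set String) :=
  (PySem.List.pyRange 0 9 1).map (fun b =>
    PySem.Set.ofList ((((PySem.List.pyRange 0 3 1).flatMap (fun j =>
        (PySem.List.pyRange 0 3 1).map (fun i => (j, i)))).filter (fun c =>
          !(pvCell p (PySem.Int.floordiv b 3 * 3 + c.1) (PySem.Int.mod b 3 * 3 + c.2) == "."))).map
      (fun c => pvCell p (PySem.Int.floordiv b 3 * 3 + c.1) (PySem.Int.mod b 3 * 3 + c.2))))

-- the body of B's loop; state = (puzzle, new_candidates, changed, row_used, col_used, box_used)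
def pvStepB
    (st : List (List String) × List (Int × Int × List String) × Bool ×
          List (PySem.Set String) × List (PySem.Set String) × List (PySem.Set String))
    (t : Int × Int × List String) :
    List (List String) × List (Int × Int × List String) × Bool ×
    List (PySem.Set String) × List (PySem.Set String) × List (PySem.Set String) :=
  match st, t with
  | (p, out, chg, rU, cU, bU), (y, x, cand) =>
    let b := pvBox y x
    let c := PySem.Set.diff (PySem.Set.diff (PySem.Set.diff cand
                (PySem.List.pyGetD rU y [])) (PySem.List.pyGetD cU x [])) (PySem.List.pyGetD bU b [])
    if PySem.Set.len c == 1 then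
      let v := PySem.List.pyGetD c 0 ""
      (pvSetCell p y x v, out, true,
       PySem.List.pySetD rU y (PySem.Set.add (PySem.List.pyGetD rU y []) v),
       PySem.List.pySetD cU x (PySem.Set.add (PySem.List.pyGetD cU x []) v),
       PySem.List.pySetD bU b (PySem.Set.add (PySem.List.pyGetD bU b []) v))
    else (p, out ++ [(y, x, c)], chg, rU, cU, bU)

def single_candidate_alt (puzzle : List (List String)) (candidates : List (Int × Int × List String)) (changed : Bool) : List (List String) × (List (Int × Int × List String)) × Bool :=
  if candidates = [] then (puzzle, [], changed)
  else
    let st := candidates.foldl pvStepB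
      (puzzle, [], changed, pvRowUsed puzzle, pvColUsed puzzle, pvBoxUsed puzzle)
    (st.1, st.2.1, st.2.2.1)

-- ===== PRECONDITION & SPEC =====
-- Pre_ admits every input with no candidates at all (there both functions do nothing), and otherwise
-- restricts to the natural Sudoku domain: a board of at least 9 rows × 9 columns and candidate
-- entries keyed by distinct in-range coordinates of EMPTY ('.') cells, with '.'-free candidate sets;
-- outside it A either raises (short boards, far out-of-range keys) or its value rests on accidents of
-- its implementation (negative-index wraparound, a filled or '.'-filled cell acting as its own
-- influencer) that no caller of a Sudoku elimination step would rely on.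
def Pre_single_candidate (puzzle : List (List String)) (candidates : List (Int × Int × List String)) (changed : Bool) : Prop :=
  candidates = [] ∨
  (9 ≤ puzzle.length ∧ (∀ r ∈ puzzle.take 9, 9 ≤ r.length) ∧
  (∀ t ∈ candidates, 0 ≤ t.1 ∧ t.1 < 9 ∧ 0 ≤ t.2.1 ∧ t.2.1 < 9 ∧
      (puzzle.getD t.1.toNat []).getD t.2.1.toNat "" = "." ∧ "." ∉ t.2.2) ∧
  (candidates.map (fun t => (t.1, t.2.1))).Nodup)
instance (puzzle : List (List String)) (candidates : List (Int × Int × List String)) (changed : Bool) : Decidable (Pre_single_candidate puzzle candidates changed) := by unfold Pre_single_candidate; infer_instance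

def pvWitness_single_candidate : List (List String) × (List (Int × Int × List String)) × Bool :=
  ([[".", "2", "3", "4", "5", "6", "7", "8", "."],
    ["4", "5", "6", "7", "8", "9", "1", "2", "3"],
    ["7", "8", "9", "1", "2", "3", "4", "5", "6"],
    ["2", "3", "4", "5", "6", "7", "8", "9", "1"],
    ["5", "6", "7", "8", "9", "1", "2", "3", "4"],
    ["8", "9", "1", "2", "3", "4", "5", "6", "7"],
    ["3", "4", "5", "6", "7", "8", "9", "1", "2"],
    ["6", "7", "8", "9", "1", "2", "3", "4", "5"],
    ["9", "1", "2", "3", "4", "5", "6", "7", "8"]],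
   [(0, 0, ["1", "5"]), (0, 8, ["9", "5"])], false)

def Spec_single_candidate (puzzle : List (List String)) (candidates : List (Int × Int × List String)) (changed : Bool) (out : List (List String) × (List (Int × Int × List String)) × Bool) : Prop := out = single_candidate_alt puzzle candidates changed
instance (puzzle : List (List String)) (candidates : List (Int × Int × List String)) (changed : Bool) (out : List (List String) × (List (Int × Int × List String)) × Bool) : Decidable (Spec_single_candidate puzzle candidates changed out) := by unfold Spec_single_candidate; infer_instance

-- ===== CLAIM (what is proved, stated in full; the proofs are below) =====
def Claim_equal_single_candidate : Prop := ∀ (puzzle : List (List String)) (candidates : List (Int × Int × List String)) (changed : Bool), Dom_single_candidate puzzle candidates changed → Pre_single_candidate puzzle candidates changed → Spec_single_candidate puzzle candidates changed (single_candidate puzzle candidates changed)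

-- ===== LEMMAS AND PROOFS =====

-- the common "spine" of both loops: processes the candidate entries in order against the evolving
-- puzzle, returning (puzzle', all updated entries, kept (non-singleton) entries, deleted keys, changed)
def procS : List (List String) → Bool → List (Int × Int × List String) →
    List (List String) × List (Int × Int × List String) × List (Int × Int × List String) ×
    List (Int × Int) × Bool
  | p, chg, [] => (p, [], [], [], chg)
  | p, chg, t :: es =>
    let c := PySem.Set.diff t.2.2 (pvInfl p t.1 t.2.1)
    if PySem.Set.len c == 1 then
      let r := procS (pvSetCell p t.1 t.2.1 (PySem.List.pyGetD c 0 "")) true es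
      (r.1, (t.1, t.2.1, c) :: r.2.1, r.2.2.1, (t.1, t.2.1) :: r.2.2.2.1, r.2.2.2.2)
    else
      let r := procS p chg es
      (r.1, (t.1, t.2.1, c) :: r.2.1, (t.1, t.2.1, c) :: r.2.2.1, r.2.2.2.1, r.2.2.2.2)

def pvResh (t : Int × Int × List String) : (Int × Int) × List String := ((t.1, t.2.1), t.2.2)

-- invariants
def PuzInv (p : List (List String)) : Prop := 9 ≤ p.length ∧ ∀ r ∈ p.take 9, 9 ≤ r.length

def RowInv (p : List (List String)) (rU : List (PySem.Set String)) : Prop :=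
  rU.length = 9 ∧ ∀ y : Int, 0 ≤ y → y < 9 → ∀ v,
    (v ∈ PySem.List.pyGetD rU y [] ↔ v ≠ "." ∧ ∃ i : Int, 0 ≤ i ∧ i < 9 ∧ pvCell p y i = v)

def ColInv (p : List (List String)) (cU : List (PySem.Set String)) : Prop :=
  cU.length = 9 ∧ ∀ x : Int, 0 ≤ x → x < 9 → ∀ v,
    (v ∈ PySem.List.pyGetD cU x [] ↔ v ≠ "." ∧ ∃ j : Int, 0 ≤ j ∧ j < 9 ∧ pvCell p j x = v)

def BoxInv (p : List (List String)) (bU : List (PySem.Set String)) : Prop :=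
  bU.length = 9 ∧ ∀ b : Int, 0 ≤ b → b < 9 → ∀ v,
    (v ∈ PySem.List.pyGetD bU b [] ↔ v ≠ "." ∧ ∃ j i : Int, 0 ≤ j ∧ j < 9 ∧ 0 ≤ i ∧ i < 9 ∧
        pvBox j i = b ∧ pvCell p j i = v)

def EntOK (p : List (List String)) (t : Int × Int × List String) : Prop :=
  0 ≤ t.1 ∧ t.1 < 9 ∧ 0 ≤ t.2.1 ∧ t.2.1 < 9 ∧ pvCell p t.1 t.2.1 = "." ∧ "." ∉ t.2.2

-- ---------- small generic utilities ----------

lemma pv_getD_nonneg {α : Type} (xs : List α) (i : Int) (d : α) (h : 0 ≤ i) :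
    PySem.List.pyGetD xs i d = xs.getD i.toNat d := by
  rw [PySem.List.pyGetD, PySem.List.pyGet?_of_nonneg xs h, List.getD_eq_getElem?_getD]

lemma pv_setD_getD {α : Type} (xs : List α) (n m : Int) (v d : α) (h0 : 0 ≤ n)
    (hn : n.toNat < xs.length) (h0m : 0 ≤ m) :
    PySem.List.pyGetD (PySem.List.pySetD xs n v) m d
      = if m = n then v else PySem.List.pyGetD xs m d := by
  rw [PySem.List.pySetD_of_nonneg xs v h0, pv_getD_nonneg _ _ _ h0m, pv_getD_nonneg _ _ _ h0m]
  by_cases h : m = n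
  · subst h
    simp [List.getD_eq_getElem?_getD, List.getElem?_set, hn]
  · have hne : n.toNat ≠ m.toNat := by omega
    simp [List.getD_eq_getElem?_getD, List.getElem?_set, hne, h]

lemma pv_getD_eq_getElem {α : Type} (l : List α) (n : Nat) (d : α) (h : n < l.length) :
    l.getD n d = l[n] := by
  rw [List.getD_eq_getElem?_getD, List.getElem?_eq_getElem h]; rfl

lemma mem_take9 {row : List String} (h9 : 9 ≤ row.length) (v : String) :
    v ∈ row.take 9 ↔ ∃ n : Nat, n < 9 ∧ row.getD n "" = v := by
  rw [List.mem_iff_getElem]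
  constructor
  · rintro ⟨i, hi, he⟩
    have hi9 : i < 9 := by simp [List.length_take] at hi; omega
    refine ⟨i, hi9, ?_⟩
    rw [pv_getD_eq_getElem _ _ _ (by omega), ← he, List.getElem_take]
  · rintro ⟨n, hn, he⟩
    refine ⟨n, by simp [List.length_take]; omega, ?_⟩
    rw [List.getElem_take]
    rw [pv_getD_eq_getElem _ _ _ (by omega)] at he
    exact he

lemma row_mem_take (p : List (List String)) (hp1 : 9 ≤ p.length) (y : Nat) (hy : y < 9) :
    p.getD y [] ∈ p.take 9 := by
  have hyl : y < p.length := by omega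
  have h' : y < (p.take 9).length := by simp [List.length_take]; omega
  have hmem := List.getElem_mem h'
  rw [List.getElem_take] at hmem
  rw [pv_getD_eq_getElem _ _ _ hyl]
  exact hmem

lemma pv_slice9 {α : Type} (xs : List α) : PySem.List.slice xs none (some 9) = xs.take 9 := by
  simp [PySem.List.slice, PySem.List.clampIdx]

lemma pv_fd3 (a : Int) : PySem.Int.floordiv a 3 = a / 3 :=
  PySem.Int.floordiv_eq_ediv_of_pos (by norm_num)

lemma pv_md3 (a : Int) : PySem.Int.mod a 3 = a % 3 :=
  PySem.Int.mod_eq_emod_of_pos (by norm_num)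

lemma pvBox_eq (y x : Int) : pvBox y x = (y / 3) * 3 + x / 3 := by
  rw [pvBox, pv_fd3, pv_fd3]

lemma pvBox_bounds {y x : Int} (hy0 : 0 ≤ y) (hy9 : y < 9) (hx0 : 0 ≤ x) (hx9 : x < 9) :
    0 ≤ pvBox y x ∧ pvBox y x < 9 := by
  rw [pvBox_eq]; omega

lemma pv_get0_mem (c : List String) (h : c.length = 1) :
    PySem.List.pyGetD c 0 "" ∈ c := by
  obtain ⟨w, rfl⟩ := List.length_eq_one_iff.mp h
  rw [PySem.List.pyGetD_zero_cons]
  exact List.mem_cons_self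

-- ---------- cell access / assignment ----------

lemma pvCell_getD (p : List (List String)) (y x : Int) (hy : 0 ≤ y) (hx : 0 ≤ x) :
    pvCell p y x = (p.getD y.toNat []).getD x.toNat "" := by
  rw [pvCell, pv_getD_nonneg _ _ _ hy, pv_getD_nonneg _ _ _ hx]

lemma puz_row_len (p : List (List String)) (hp : PuzInv p) (y : Int) (h0 : 0 ≤ y) (h9 : y < 9) :
    9 ≤ (p.getD y.toNat []).length :=
  hp.2 _ (row_mem_take p hp.1 y.toNat (by omega))

lemma cell_setCell (p : List (List String)) (v : String) (y x j i : Int) (hp : PuzInv p)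
    (hy0 : 0 ≤ y) (hy9 : y < 9) (hx0 : 0 ≤ x) (hx9 : x < 9)
    (hj0 : 0 ≤ j) (hj9 : j < 9) (hi0 : 0 ≤ i) (hi9 : i < 9) :
    pvCell (pvSetCell p y x v) j i = if j = y ∧ i = x then v else pvCell p j i := by
  have hylen : y.toNat < p.length := by have := hp.1; omega
  have hrow : 9 ≤ (p.getD y.toNat []).length := puz_row_len p hp y hy0 hy9
  rw [pvCell, pvSetCell, pv_setD_getD p y j _ [] hy0 hylen hj0]
  by_cases hjy : j = y
  · rw [if_pos hjy]
    have hxlen : x.toNat < (PySem.List.pyGetD p y []).length := by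
      rw [pv_getD_nonneg p y [] hy0]; omega
    rw [pv_setD_getD _ x i v "" hx0 hxlen hi0]
    by_cases hix : i = x
    · rw [if_pos hix, if_pos ⟨hjy, hix⟩]
    · rw [if_neg hix, if_neg (by tauto)]
      rw [pvCell, hjy]
  · rw [if_neg hjy, if_neg (by tauto), pvCell]

lemma puzInv_setCell (p : List (List String)) (v : String) (y x : Int) (hp : PuzInv p)
    (hy0 : 0 ≤ y) (hy9 : y < 9) (hx0 : 0 ≤ x) :
    PuzInv (pvSetCell p y x v) := by
  have hylen : y.toNat < p.length := by have := hp.1; omega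
  rw [pvSetCell, PySem.List.pySetD_of_nonneg p _ hy0]
  constructor
  · rw [List.length_set]; exact hp.1
  · intro r hr
    rw [List.mem_iff_getElem] at hr
    obtain ⟨k, hk, he⟩ := hr
    rw [List.length_take, List.length_set] at hk
    rw [List.getElem_take, List.getElem_set] at he
    by_cases hky : y.toNat = k
    · rw [if_pos hky] at he
      rw [← he, PySem.List.length_pySetD, pv_getD_nonneg p y [] hy0]
      exact puz_row_len p hp y hy0 hy9
    · rw [if_neg hky] at he
      apply hp.2
      rw [← he]
      have h' : k < (p.take 9).length := by rw [List.length_take]; omega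
      have hmem := List.getElem_mem h'
      rwa [List.getElem_take] at hmem

-- ---------- neighbour characterizations ----------

lemma mem_row_nb (c : Int × Int) (y x : Int) :
    c ∈ get_row_neighbours y x 9 ↔ c.1 = y ∧ 0 ≤ c.2 ∧ c.2 < 9 ∧ c.2 ≠ x := by
  simp only [get_row_neighbours, List.mem_map, List.mem_filter, PySem.List.mem_pyRange_one]
  constructor
  · rintro ⟨i, ⟨⟨h0, h9⟩, hne⟩, rfl⟩
    simp only [bne_iff_ne, Bool.not_eq_true', beq_eq_false_iff_ne] at hne
    exact ⟨rfl, h0, h9, hne⟩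
  · rintro ⟨h1, h0, h9, hne⟩
    refine ⟨c.2, ⟨⟨h0, h9⟩, by simp [hne]⟩, ?_⟩
    rw [← h1]

lemma mem_col_nb (c : Int × Int) (y x : Int) :
    c ∈ get_column_neighbours y x 9 ↔ c.2 = x ∧ 0 ≤ c.1 ∧ c.1 < 9 ∧ c.1 ≠ y := by
  simp only [get_column_neighbours, List.mem_map, List.mem_filter, PySem.List.mem_pyRange_one]
  constructor
  · rintro ⟨j, ⟨⟨h0, h9⟩, hne⟩, rfl⟩
    simp only [Bool.not_eq_true', beq_eq_false_iff_ne] at hne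
    exact ⟨rfl, h0, h9, hne⟩
  · rintro ⟨h1, h0, h9, hne⟩
    refine ⟨c.1, ⟨⟨h0, h9⟩, by simp [hne]⟩, ?_⟩
    rw [← h1]

lemma mem_sq_nb (c : Int × Int) (y x : Int) :
    c ∈ get_square_neighbours y x 9 9 ↔
      (y / 3) * 3 ≤ c.1 ∧ c.1 < (y / 3) * 3 + 3 ∧ (x / 3) * 3 ≤ c.2 ∧ c.2 < (x / 3) * 3 + 3 ∧
        ¬(c.1 = y ∧ c.2 = x) := by
  simp only [get_square_neighbours, pv_fd3, List.mem_flatMap, List.mem_map, List.mem_filter,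
    PySem.List.mem_pyRange_one]
  constructor
  · rintro ⟨j, ⟨hj0, hj3⟩, i, ⟨⟨hi0, hi3⟩, hcond⟩, rfl⟩
    simp only [Bool.not_eq_true', Bool.and_eq_false_iff, beq_eq_false_iff_ne] at hcond
    refine ⟨by omega, by omega, by omega, by omega, ?_⟩
    rintro ⟨e1, e2⟩
    rcases hcond with h | h
    · exact h e2
    · exact h e1
  · rintro ⟨h1, h2, h3, h4, h5⟩
    refine ⟨c.1 - (y / 3) * 3, ⟨by omega, by omega⟩, c.2 - (x / 3) * 3, ⟨⟨by omega, by omega⟩, ?_⟩, ?_⟩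
    · simp only [Bool.not_eq_true', Bool.and_eq_false_iff, beq_eq_false_iff_ne]
      by_cases e1 : c.1 = y
      · left; intro e2; exact h5 ⟨e1, by omega⟩
      · right; intro e2; exact e1 (by omega)
    · have e1 : c.1 - (y / 3) * 3 + (y / 3) * 3 = c.1 := by omega
      have e2 : c.2 - (x / 3) * 3 + (x / 3) * 3 = c.2 := by omega
      rw [e1, e2]

-- ---------- influencer set vs used sets ----------

lemma infl_mem_iff (p : List (List String)) (rU cU bU : List (PySem.Set String)) (y x : Int)
    (hp : PuzInv p) (hr : RowInv p rU) (hc : ColInv p cU) (hb : BoxInv p bU)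
    (hy0 : 0 ≤ y) (hy9 : y < 9) (hx0 : 0 ≤ x) (hx9 : x < 9)
    (hcell : pvCell p y x = ".") (v : String) :
    v ∈ pvInfl p y x ↔
      v ∈ PySem.List.pyGetD rU y [] ∨ v ∈ PySem.List.pyGetD cU x [] ∨
        v ∈ PySem.List.pyGetD bU (pvBox y x) [] := by
  obtain ⟨hb0, hb9⟩ := pvBox_bounds hy0 hy9 hx0 hx9
  rw [pvInfl, PySem.Set.mem_ofList, hr.2 y hy0 hy9 v, hc.2 x hx0 hx9 v,
    hb.2 (pvBox y x) hb0 hb9 v]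
  simp only [List.mem_map, List.mem_filter, get_influencers, List.mem_append]
  constructor
  · rintro ⟨c, ⟨hmem, hne⟩, rfl⟩
    simp only [Bool.not_eq_true', beq_eq_false_iff_ne] at hne
    rcases hmem with (hrow | hcol) | hsq
    · rw [mem_row_nb] at hrow
      obtain ⟨e1, e2, e3, _⟩ := hrow
      exact Or.inl ⟨hne, c.2, e2, e3, by rw [← e1]⟩
    · rw [mem_col_nb] at hcol
      obtain ⟨e1, e2, e3, _⟩ := hcol
      exact Or.inr (Or.inl ⟨hne, c.1, e2, e3, by rw [← e1]⟩)
    · rw [mem_sq_nb] at hsq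
      obtain ⟨e1, e2, e3, e4, _⟩ := hsq
      refine Or.inr (Or.inr ⟨hne, c.1, c.2, by omega, by omega, by omega, by omega, ?_, rfl⟩)
      rw [pvBox_eq, pvBox_eq]; omega
  · rintro (⟨hvne, i, hi0, hi9, hcv⟩ | ⟨hvne, j, hj0, hj9, hcv⟩ |
        ⟨hvne, j, i, hj0, hj9, hi0, hi9, hbeq, hcv⟩)
    · have hix : i ≠ x := by
        intro h; rw [h, hcell] at hcv; exact hvne hcv.symm
      refine ⟨(y, i), ⟨Or.inl (Or.inl ?_), ?_⟩, hcv⟩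
      · rw [mem_row_nb]; exact ⟨rfl, hi0, hi9, hix⟩
      · simp only [Bool.not_eq_true', beq_eq_false_iff_ne]
        rw [hcv]; exact hvne
    · have hjy : j ≠ y := by
        intro h; rw [h, hcell] at hcv; exact hvne hcv.symm
      refine ⟨(j, x), ⟨Or.inl (Or.inr ?_), ?_⟩, hcv⟩
      · rw [mem_col_nb]; exact ⟨rfl, hj0, hj9, hjy⟩
      · simp only [Bool.not_eq_true', beq_eq_false_iff_ne]
        rw [hcv]; exact hvne
    · have hself : ¬(j = y ∧ i = x) := by
        rintro ⟨rfl, rfl⟩; rw [hcell] at hcv; exact hvne hcv.symm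
      rw [pvBox_eq, pvBox_eq] at hbeq
      refine ⟨(j, i), ⟨Or.inr ?_, ?_⟩, hcv⟩
      · rw [mem_sq_nb]
        exact ⟨by omega, by omega, by omega, by omega, hself⟩
      · simp only [Bool.not_eq_true', beq_eq_false_iff_ne]
        rw [hcv]; exact hvne

lemma diff3_eq (cand : List String) (p : List (List String))
    (rU cU bU : List (PySem.Set String)) (y x : Int)
    (hp : PuzInv p) (hr : RowInv p rU) (hc : ColInv p cU) (hb : BoxInv p bU)
    (hy0 : 0 ≤ y) (hy9 : y < 9) (hx0 : 0 ≤ x) (hx9 : x < 9)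
    (hcell : pvCell p y x = ".") :
    PySem.Set.diff (PySem.Set.diff (PySem.Set.diff cand (PySem.List.pyGetD rU y []))
        (PySem.List.pyGetD cU x [])) (PySem.List.pyGetD bU (pvBox y x) [])
      = PySem.Set.diff cand (pvInfl p y x) := by
  simp only [PySem.Set.diff, List.filter_filter]
  apply List.filter_congr
  intro a _
  have h := infl_mem_iff p rU cU bU y x hp hr hc hb hy0 hy9 hx0 hx9 hcell a
  simp only [PySem.Set.contains_eq_listContains, List.contains_eq_mem]
  by_cases h1 : a ∈ PySem.List.pyGetD rU y [] <;>
    by_cases h2 : a ∈ PySem.List.pyGetD cU x [] <;>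
      by_cases h3 : a ∈ PySem.List.pyGetD bU (pvBox y x) [] <;>
        simp [h1, h2, h3, h]

-- ---------- invariants: initialization ----------

lemma rowInv_init (p : List (List String)) (hp : PuzInv p) : RowInv p (pvRowUsed p) := by
  unfold RowInv pvRowUsed
  rw [pv_slice9]
  constructor
  · have h9 := hp.1
    simp only [List.length_map, List.length_take]
    omega
  · intro y hy0 hy9 v
    have hyl : y.toNat < p.length := by have := hp.1; omega
    have hyt : y.toNat < (List.map (fun row => PySem.Set.ofList
        ((PySem.List.slice row none (some 9)).filter (fun v => !(v == ".")))) (p.take 9)).length := by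
      simp only [List.length_map, List.length_take]; omega
    rw [pv_getD_nonneg _ _ _ hy0, pv_getD_eq_getElem _ _ _ hyt, List.getElem_map,
      List.getElem_take, pv_slice9]
    have hrow : 9 ≤ p[y.toNat].length := by
      have := puz_row_len p hp y hy0 hy9
      rwa [pv_getD_eq_getElem _ _ _ hyl] at this
    rw [PySem.Set.mem_ofList]
    simp only [List.mem_filter, Bool.not_eq_true', beq_eq_false_iff_ne]
    rw [mem_take9 hrow]
    constructor
    · rintro ⟨⟨n, hn, he⟩, hvne⟩
      refine ⟨hvne, (n : Int), by omega, by omega, ?_⟩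
      rw [pvCell_getD p y n hy0 (by omega), pv_getD_eq_getElem _ _ _ hyl]
      simpa using he
    · rintro ⟨hvne, i, hi0, hi9, he⟩
      rw [pvCell_getD p y i hy0 hi0, pv_getD_eq_getElem _ _ _ hyl] at he
      exact ⟨⟨i.toNat, by omega, he⟩, hvne⟩

lemma colInv_init (p : List (List String)) (hp : PuzInv p) : ColInv p (pvColUsed p) := by
  unfold ColInv pvColUsed
  constructor
  · simp [PySem.List.pyRange]
  · intro x hx0 hx9 v
    rw [PySem.List.pyGetD_map_pyRange_of_nonneg _ 9 x [] hx0 hx9]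
    rw [PySem.Set.mem_ofList]
    simp only [List.mem_map, List.mem_filter, PySem.List.mem_pyRange_one,
      Bool.not_eq_true', beq_eq_false_iff_ne]
    constructor
    · rintro ⟨j, ⟨⟨hj0, hj9⟩, hne⟩, hcv⟩
      exact ⟨hcv ▸ hne, j, hj0, hj9, hcv⟩
    · rintro ⟨hvne, j, hj0, hj9, hcv⟩
      exact ⟨j, ⟨⟨hj0, hj9⟩, hcv ▸ hvne⟩, hcv⟩

lemma boxInv_init (p : List (List String)) (hp : PuzInv p) : BoxInv p (pvBoxUsed p) := by
  unfold BoxInv pvBoxUsed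
  constructor
  · simp [PySem.List.pyRange]
  · intro b hb0 hb9 v
    rw [PySem.List.pyGetD_map_pyRange_of_nonneg _ 9 b [] hb0 hb9]
    rw [PySem.Set.mem_ofList]
    simp only [List.mem_map, List.mem_filter, List.mem_flatMap, PySem.List.mem_pyRange_one,
      Bool.not_eq_true', beq_eq_false_iff_ne, pv_fd3, pv_md3]
    constructor
    · rintro ⟨c, ⟨⟨j, ⟨hj0, hj3⟩, i, ⟨hi0, hi3⟩, rfl⟩, hne⟩, hcv⟩
      refine ⟨hcv ▸ hne, b / 3 * 3 + j, b % 3 * 3 + i, by omega, by omega, by omega, by omega,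
        ?_, hcv⟩
      rw [pvBox_eq]; omega
    · rintro ⟨hvne, j, i, hj0, hj9, hi0, hi9, hbeq, hcv⟩
      rw [pvBox_eq] at hbeq
      refine ⟨(j - b / 3 * 3, i - b % 3 * 3),
        ⟨⟨j - b / 3 * 3, ⟨by omega, by omega⟩, i - b % 3 * 3, ⟨by omega, by omega⟩, rfl⟩, ?_⟩, ?_⟩
      · have e1 : b / 3 * 3 + (j - b / 3 * 3) = j := by omega
        have e2 : b % 3 * 3 + (i - b % 3 * 3) = i := by omega
        rw [e1, e2]
        exact hcv ▸ hvne
      · have e1 : b / 3 * 3 + (j - b / 3 * 3) = j := by omega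
        have e2 : b % 3 * 3 + (i - b % 3 * 3) = i := by omega
        rw [e1, e2]
        exact hcv
-- ---------- invariants: preservation under a fill ----------

lemma rowInv_update (p : List (List String)) (rU : List (PySem.Set String)) (y x : Int)
    (v : String) (hp : PuzInv p) (hr : RowInv p rU)
    (hy0 : 0 ≤ y) (hy9 : y < 9) (hx0 : 0 ≤ x) (hx9 : x < 9)
    (hcell : pvCell p y x = ".") (hv : v ≠ ".") :
    RowInv (pvSetCell p y x v)
      (PySem.List.pySetD rU y (PySem.Set.add (PySem.List.pyGetD rU y []) v)) := by
  have hylen : y.toNat < rU.length := by rw [hr.1]; omega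
  constructor
  · rw [PySem.List.length_pySetD]; exact hr.1
  · intro r hr0 hr9 w
    rw [pv_setD_getD rU y r _ [] hy0 hylen hr0]
    by_cases hry : r = y
    · subst hry
      rw [if_pos rfl, PySem.Set.mem_add, hr.2 r hr0 hr9 w]
      constructor
      · rintro (⟨hw, i, hi0, hi9, hc⟩ | hwv)
        · have hix : i ≠ x := by
            intro h; rw [h, hcell] at hc; exact hw hc.symm
          refine ⟨hw, i, hi0, hi9, ?_⟩
          rw [cell_setCell p v r x r i hp hr0 hr9 hx0 hx9 hr0 hr9 hi0 hi9,
            if_neg (by tauto)]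
          exact hc
        · rw [hwv]
          refine ⟨hv, x, hx0, hx9, ?_⟩
          rw [cell_setCell p v r x r x hp hr0 hr9 hx0 hx9 hr0 hr9 hx0 hx9, if_pos ⟨rfl, rfl⟩]
      · rintro ⟨hw, i, hi0, hi9, hc⟩
        rw [cell_setCell p v r x r i hp hr0 hr9 hx0 hx9 hr0 hr9 hi0 hi9] at hc
        by_cases hix : i = x
        · rw [if_pos ⟨rfl, hix⟩] at hc
          exact Or.inr hc.symm
        · rw [if_neg (by tauto)] at hc
          exact Or.inl ⟨hw, i, hi0, hi9, hc⟩
    · simp only [if_neg hry]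
      rw [hr.2 r hr0 hr9 w]
      have hcells : ∀ i : Int, 0 ≤ i → i < 9 →
          pvCell (pvSetCell p y x v) r i = pvCell p r i := by
        intro i h1 h2
        rw [cell_setCell p v y x r i hp hy0 hy9 hx0 hx9 hr0 hr9 h1 h2, if_neg (by tauto)]
      constructor
      · rintro ⟨hw, i, h1, h2, h3⟩
        exact ⟨hw, i, h1, h2, by rw [hcells i h1 h2]; exact h3⟩
      · rintro ⟨hw, i, h1, h2, h3⟩
        exact ⟨hw, i, h1, h2, by rw [hcells i h1 h2] at h3; exact h3⟩

lemma colInv_update (p : List (List String)) (cU : List (PySem.Set String)) (y x : Int)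
    (v : String) (hp : PuzInv p) (hc : ColInv p cU)
    (hy0 : 0 ≤ y) (hy9 : y < 9) (hx0 : 0 ≤ x) (hx9 : x < 9)
    (hcell : pvCell p y x = ".") (hv : v ≠ ".") :
    ColInv (pvSetCell p y x v)
      (PySem.List.pySetD cU x (PySem.Set.add (PySem.List.pyGetD cU x []) v)) := by
  have hxlen : x.toNat < cU.length := by rw [hc.1]; omega
  constructor
  · rw [PySem.List.length_pySetD]; exact hc.1
  · intro r hr0 hr9 w
    rw [pv_setD_getD cU x r _ [] hx0 hxlen hr0]
    by_cases hrx : r = x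
    · subst hrx
      rw [if_pos rfl, PySem.Set.mem_add, hc.2 r hr0 hr9 w]
      constructor
      · rintro (⟨hw, j, hj0, hj9, hcv⟩ | hwv)
        · have hjy : j ≠ y := by
            intro h; rw [h, hcell] at hcv; exact hw hcv.symm
          refine ⟨hw, j, hj0, hj9, ?_⟩
          rw [cell_setCell p v y r j r hp hy0 hy9 hr0 hr9 hj0 hj9 hr0 hr9, if_neg (by tauto)]
          exact hcv
        · rw [hwv]
          refine ⟨hv, y, hy0, hy9, ?_⟩
          rw [cell_setCell p v y r y r hp hy0 hy9 hr0 hr9 hy0 hy9 hr0 hr9, if_pos ⟨rfl, rfl⟩]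
      · rintro ⟨hw, j, hj0, hj9, hcv⟩
        rw [cell_setCell p v y r j r hp hy0 hy9 hr0 hr9 hj0 hj9 hr0 hr9] at hcv
        by_cases hjy : j = y
        · rw [if_pos ⟨hjy, rfl⟩] at hcv
          exact Or.inr hcv.symm
        · rw [if_neg (by tauto)] at hcv
          exact Or.inl ⟨hw, j, hj0, hj9, hcv⟩
    · simp only [if_neg hrx]
      rw [hc.2 r hr0 hr9 w]
      have hcells : ∀ j : Int, 0 ≤ j → j < 9 →
          pvCell (pvSetCell p y x v) j r = pvCell p j r := by
        intro j h1 h2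
        rw [cell_setCell p v y x j r hp hy0 hy9 hx0 hx9 h1 h2 hr0 hr9, if_neg (by tauto)]
      constructor
      · rintro ⟨hw, j, h1, h2, h3⟩
        exact ⟨hw, j, h1, h2, by rw [hcells j h1 h2]; exact h3⟩
      · rintro ⟨hw, j, h1, h2, h3⟩
        exact ⟨hw, j, h1, h2, by rw [hcells j h1 h2] at h3; exact h3⟩

lemma boxInv_update (p : List (List String)) (bU : List (PySem.Set String)) (y x : Int)
    (v : String) (hp : PuzInv p) (hb : BoxInv p bU)
    (hy0 : 0 ≤ y) (hy9 : y < 9) (hx0 : 0 ≤ x) (hx9 : x < 9)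
    (hcell : pvCell p y x = ".") (hv : v ≠ ".") :
    BoxInv (pvSetCell p y x v)
      (PySem.List.pySetD bU (pvBox y x) (PySem.Set.add (PySem.List.pyGetD bU (pvBox y x) []) v)) := by
  obtain ⟨hb0, hb9⟩ := pvBox_bounds hy0 hy9 hx0 hx9
  have hblen : (pvBox y x).toNat < bU.length := by rw [hb.1]; omega
  constructor
  · rw [PySem.List.length_pySetD]; exact hb.1
  · intro r hr0 hr9 w
    rw [pv_setD_getD bU (pvBox y x) r _ [] hb0 hblen hr0]
    by_cases hrb : r = pvBox y x
    · rw [if_pos hrb, PySem.Set.mem_add, hrb, hb.2 (pvBox y x) hb0 hb9 w]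
      constructor
      · rintro (⟨hw, j, i, hj0, hj9, hi0, hi9, hbeq, hcv⟩ | hwv)
        · have hji : ¬(j = y ∧ i = x) := by
            rintro ⟨rfl, rfl⟩; rw [hcell] at hcv; exact hw hcv.symm
          refine ⟨hw, j, i, hj0, hj9, hi0, hi9, hbeq, ?_⟩
          rw [cell_setCell p v y x j i hp hy0 hy9 hx0 hx9 hj0 hj9 hi0 hi9, if_neg hji]
          exact hcv
        · rw [hwv]
          refine ⟨hv, y, x, hy0, hy9, hx0, hx9, rfl, ?_⟩
          rw [cell_setCell p v y x y x hp hy0 hy9 hx0 hx9 hy0 hy9 hx0 hx9, if_pos ⟨rfl, rfl⟩]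
      · rintro ⟨hw, j, i, hj0, hj9, hi0, hi9, hbeq, hcv⟩
        rw [cell_setCell p v y x j i hp hy0 hy9 hx0 hx9 hj0 hj9 hi0 hi9] at hcv
        by_cases hji : j = y ∧ i = x
        · rw [if_pos hji] at hcv
          exact Or.inr hcv.symm
        · rw [if_neg hji] at hcv
          exact Or.inl ⟨hw, j, i, hj0, hj9, hi0, hi9, hbeq, hcv⟩
    · simp only [if_neg hrb]
      rw [hb.2 r hr0 hr9 w]
      constructor
      · rintro ⟨hw, j, i, hj0, hj9, hi0, hi9, hbeq, hcv⟩
        have hji : ¬(j = y ∧ i = x) := by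
          rintro ⟨rfl, rfl⟩; exact hrb hbeq.symm
        refine ⟨hw, j, i, hj0, hj9, hi0, hi9, hbeq, ?_⟩
        rw [cell_setCell p v y x j i hp hy0 hy9 hx0 hx9 hj0 hj9 hi0 hi9, if_neg hji]
        exact hcv
      · rintro ⟨hw, j, i, hj0, hj9, hi0, hi9, hbeq, hcv⟩
        have hji : ¬(j = y ∧ i = x) := by
          rintro ⟨rfl, rfl⟩; exact hrb hbeq.symm
        rw [cell_setCell p v y x j i hp hy0 hy9 hx0 hx9 hj0 hj9 hi0 hi9, if_neg hji] at hcv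
        exact ⟨hw, j, i, hj0, hj9, hi0, hi9, hbeq, hcv⟩
-- ---------- dict lemmas (assoc-list forms used by port A) ----------

lemma find?_key_append_ne {ν : Type} (pre rest : List ((Int × Int) × ν)) (k : Int × Int)
    (h : ∀ e ∈ pre, e.1 ≠ k) :
    List.find? (fun e => e.1 == k) (pre ++ rest) = List.find? (fun e => e.1 == k) rest := by
  rw [List.find?_append]
  have hn : List.find? (fun e => (e.1 == k)) pre = none := by
    rw [List.find?_eq_none]
    intro e he
    simp only [beq_iff_eq]
    exact h e he
  rw [hn, Option.none_or]

lemma dict_get?_mid {ν : Type} (pre rest : List ((Int × Int) × ν)) (k : Int × Int) (v : ν)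
    (hpre : ∀ e ∈ pre, e.1 ≠ k) :
    (PySem.Dict.mk (pre ++ (k, v) :: rest)).get? k = some v := by
  simp only [PySem.Dict.get?, PySem.Dict.items]
  rw [find?_key_append_ne _ _ _ hpre]
  simp [List.find?]

lemma dict_getD_mid {ν : Type} (pre rest : List ((Int × Int) × ν)) (k : Int × Int) (v d0 : ν)
    (hpre : ∀ e ∈ pre, e.1 ≠ k) :
    (PySem.Dict.mk (pre ++ (k, v) :: rest)).getD k d0 = v := by
  simp [PySem.Dict.getD, dict_get?_mid pre rest k v hpre]

lemma dict_modify_mid {ν : Type} (pre rest : List ((Int × Int) × ν)) (k : Int × Int)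
    (v d0 : ν) (f : ν → ν)
    (hpre : ∀ e ∈ pre, e.1 ≠ k) (hrest : ∀ e ∈ rest, e.1 ≠ k) :
    PySem.Dict.modify (PySem.Dict.mk (pre ++ (k, v) :: rest)) k d0 f
      = PySem.Dict.mk (pre ++ (k, f v) :: rest) := by
  have hget := dict_get?_mid pre rest k v hpre
  have hcont : (PySem.Dict.mk (pre ++ (k, v) :: rest)).contains k = true := by
    rw [PySem.Dict.contains_eq_isSome_get?, hget]; rfl
  simp only [PySem.Dict.modify, PySem.Dict.getD, hget, Option.getD_some]
  simp only [PySem.Dict.insert, hcont, if_pos, PySem.Dict.items]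
  apply congrArg
  rw [List.map_append, List.map_cons]
  have hpre' : List.map (fun e => if (e.1 == k) = true then (k, f v) else e) pre = pre := by
    have h1 : ∀ e ∈ pre, (if (e.1 == k) = true then (k, f v) else e) = id e := by
      intro e he
      simp [beq_iff_eq, hpre e he]
    rw [List.map_congr_left h1, List.map_id]
  have hrest' : List.map (fun e => if (e.1 == k) = true then (k, f v) else e) rest = rest := by
    have h1 : ∀ e ∈ rest, (if (e.1 == k) = true then (k, f v) else e) = id e := by
      intro e he
      simp [beq_iff_eq, hrest e he]
    rw [List.map_congr_left h1, List.map_id]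
  rw [hpre', hrest']
  simp

lemma erase_foldl : ∀ (D : List (Int × Int)) (L : List ((Int × Int) × List String)),
    D.foldl PySem.Dict.erase (PySem.Dict.mk L)
      = PySem.Dict.mk (L.filter (fun e => !(D.contains e.1)))
  | [], L => by simp
  | k :: D, L => by
    simp only [List.foldl_cons]
    have h1 : PySem.Dict.erase (PySem.Dict.mk L) k
        = PySem.Dict.mk (L.filter (fun e => !(e.1 == k))) := rfl
    rw [h1, erase_foldl D _]
    apply congrArg
    rw [List.filter_filter]
    apply List.filter_congr
    intro a _
    rw [List.contains_cons]
    cases h2 : (a.1 == k) <;> cases h3 : D.contains a.1 <;> simp [h2, h3]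

lemma ofList_eq_mk (L : List ((Int × Int) × List String))
    (h : (L.map (fun e => e.1)).Nodup) :
    PySem.Dict.ofList L = PySem.Dict.mk L := by
  have := PySem.Dict.items_foldl_insert_fresh (l := L) (k := fun e => e.1) (v := fun e => e.2)
    (d := PySem.Dict.empty) (by intro a _; rfl) h
  apply PySem.Dict.ext
  rw [PySem.Dict.ofList, PySem.Dict.update]
  have heq : (fun (acc : PySem.Dict (Int × Int) (List String)) (p : (Int × Int) × List String) =>
      acc.insert p.1 p.2) = fun d a => d.insert a.1 a.2 := rfl
  rw [heq, this]
  simp [PySem.Dict.empty]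

-- ---------- procS structural facts ----------

lemma len_beq (c : List String) : ((PySem.Set.len c == 1) = true) ↔ c.length = 1 := by
  constructor
  · intro h
    have h1 : PySem.Set.len c = 1 := beq_iff_eq.mp h
    simp only [PySem.Set.len] at h1
    omega
  · intro h
    simp [PySem.Set.len, h]

lemma procS_all_keys : ∀ (es : List (Int × Int × List String)) (p : List (List String)) (chg : Bool),
    (procS p chg es).2.1.map (fun t => (t.1, t.2.1)) = es.map (fun t => (t.1, t.2.1))
  | [], p, chg => by simp [procS]
  | ⟨y, x, cand⟩ :: es, p, chg => by
    simp only [procS]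
    by_cases hc : (PySem.Set.diff cand (pvInfl p y x)).length = 1
    · rw [if_pos ((len_beq _).mpr hc)]
      simp [procS_all_keys es]
    · rw [if_neg (fun h => hc ((len_beq _).mp h))]
      simp [procS_all_keys es]

lemma procS_dels_sub : ∀ (es : List (Int × Int × List String)) (p : List (List String)) (chg : Bool)
    (k : Int × Int), k ∈ (procS p chg es).2.2.2.1 → k ∈ es.map (fun t => (t.1, t.2.1))
  | [], p, chg, k => by simp [procS]
  | ⟨y, x, cand⟩ :: es, p, chg, k => by
    simp only [procS]
    by_cases hc : (PySem.Set.diff cand (pvInfl p y x)).length = 1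
    · rw [if_pos ((len_beq _).mpr hc)]
      simp only [List.map_cons, List.mem_cons]
      rintro (rfl | h)
      · exact Or.inl rfl
      · exact Or.inr (procS_dels_sub es _ true k h)
    · rw [if_neg (fun h => hc ((len_beq _).mp h))]
      simp only [List.map_cons, List.mem_cons]
      intro h
      exact Or.inr (procS_dels_sub es p chg k h)

lemma procS_kept_filter : ∀ (es : List (Int × Int × List String)) (p : List (List String))
    (chg : Bool), (es.map (fun t => (t.1, t.2.1))).Nodup →
    (procS p chg es).2.2.1
      = (procS p chg es).2.1.filter (fun t => !((procS p chg es).2.2.2.1.contains (t.1, t.2.1)))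
  | [], p, chg, _ => by simp [procS]
  | ⟨y, x, cand⟩ :: es, p, chg, hnd => by
    have hkey : (y, x) ∉ es.map (fun t => (t.1, t.2.1)) := (List.nodup_cons.mp hnd).1
    have hnd' := (List.nodup_cons.mp hnd).2
    simp only [procS]
    by_cases hc : (PySem.Set.diff cand (pvInfl p y x)).length = 1
    · rw [if_pos ((len_beq _).mpr hc)]
      rw [List.filter_cons]
      have hhead : (!(((y, x) :: (procS (pvSetCell p y x
            (PySem.List.pyGetD (PySem.Set.diff cand (pvInfl p y x)) 0 "")) true es).2.2.2.1).contains
              (y, x))) = false := by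
        simp [List.contains_cons]
      simp only [hhead]
      simp only [Bool.false_eq_true, ite_false]
      rw [procS_kept_filter es _ true hnd']
      apply List.filter_congr
      intro a ha
      have hamem : (a.1, a.2.1) ∈ es.map (fun t => (t.1, t.2.1)) := by
        rw [← procS_all_keys es (pvSetCell p y x
          (PySem.List.pyGetD (PySem.Set.diff cand (pvInfl p y x)) 0 "")) true]
        exact List.mem_map_of_mem ha
      have hane : ((a.1, a.2.1) == (y, x)) = false := by
        rw [beq_eq_false_iff_ne]
        intro h
        exact hkey (h ▸ hamem)
      rw [List.contains_cons, hane]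
      simp
    · rw [if_neg (fun h => hc ((len_beq _).mp h))]
      rw [List.filter_cons]
      have hknotin : (y, x) ∉ (procS p chg es).2.2.2.1 := by
        intro h
        exact hkey (procS_dels_sub es p chg _ h)
      have hhead : (!((procS p chg es).2.2.2.1.contains (y, x))) = true := by
        simp only [Bool.not_eq_true']
        rw [← Bool.not_eq_true]
        intro h
        exact hknotin (List.contains_iff_mem.mp h)
      simp only [hhead]
      simp only [ite_true]
      rw [procS_kept_filter es p chg hnd']
-- ---------- loop A equals the spine ----------

lemma foldA_eq : ∀ (es : List (Int × Int × List String)) (pre : List ((Int × Int) × List String))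
    (p : List (List String)) (chg : Bool) (dels : List (Int × Int)),
    (∀ e ∈ pre, e.1 ∉ es.map (fun t => (t.1, t.2.1))) →
    (es.map (fun t => (t.1, t.2.1))).Nodup →
    (es.map (fun t => (t.1, t.2.1))).foldl pvStepA
        (p, PySem.Dict.mk (pre ++ es.map pvResh), chg, dels)
      = ((procS p chg es).1, PySem.Dict.mk (pre ++ (procS p chg es).2.1.map pvResh),
          (procS p chg es).2.2.2.2, dels ++ (procS p chg es).2.2.2.1)
  | [], pre, p, chg, dels, _, _ => by simp [procS]
  | ⟨y, x, cand⟩ :: es, pre, p, chg, dels, hdisj, hnd => by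
    simp only [List.map_cons, List.foldl_cons]
    have hkey_es : (y, x) ∉ es.map (fun t => (t.1, t.2.1)) := (List.nodup_cons.mp hnd).1
    have hnd' := (List.nodup_cons.mp hnd).2
    have hpre_ne : ∀ e ∈ pre, e.1 ≠ (y, x) := by
      intro e he heq
      exact hdisj e he (by rw [heq]; exact List.mem_cons_self)
    have hes_ne : ∀ e ∈ es.map pvResh, e.1 ≠ (y, x) := by
      rintro e he heq
      obtain ⟨t', ht', rfl⟩ := List.mem_map.mp he
      exact hkey_es (heq ▸ List.mem_map_of_mem ht')
    have hdisj' : ∀ e ∈ pre ++ [((y, x), PySem.Set.diff cand (pvInfl p y x))],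
        e.1 ∉ es.map (fun t => (t.1, t.2.1)) := by
      intro e he
      rcases List.mem_append.mp he with h | h
      · exact fun hm => hdisj e h (List.mem_cons_of_mem _ hm)
      · rw [List.mem_singleton] at h
        rw [h]
        exact hkey_es
    simp only [pvStepA, pvResh]
    rw [dict_modify_mid pre (es.map pvResh) (y, x) cand []
      (fun s => PySem.Set.diff s (pvInfl p y x)) hpre_ne hes_ne]
    rw [dict_getD_mid pre (es.map pvResh) (y, x) _ [] hpre_ne]
    simp only [procS]
    by_cases hc : (PySem.Set.diff cand (pvInfl p y x)).length = 1
    · rw [if_pos ((len_beq _).mpr hc), if_pos ((len_beq _).mpr hc)]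
      rw [List.append_cons pre ((y, x), PySem.Set.diff cand (pvInfl p y x)) (es.map pvResh)]
      rw [foldA_eq es (pre ++ [((y, x), PySem.Set.diff cand (pvInfl p y x))]) _ true
        (dels ++ [(y, x)]) hdisj' hnd']
      simp [pvResh, List.append_assoc]
    · rw [if_neg (fun h => hc ((len_beq _).mp h)), if_neg (fun h => hc ((len_beq _).mp h))]
      rw [List.append_cons pre ((y, x), PySem.Set.diff cand (pvInfl p y x)) (es.map pvResh)]
      rw [foldA_eq es (pre ++ [((y, x), PySem.Set.diff cand (pvInfl p y x))]) p chg dels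
        hdisj' hnd']
      simp [pvResh, List.append_assoc]

-- ---------- loop B equals the spine ----------

lemma foldB_eq : ∀ (es : List (Int × Int × List String)) (p : List (List String))
    (out : List (Int × Int × List String)) (chg : Bool)
    (rU cU bU : List (PySem.Set String)),
    PuzInv p → RowInv p rU → ColInv p cU → BoxInv p bU →
    (∀ t ∈ es, EntOK p t) → (es.map (fun t => (t.1, t.2.1))).Nodup →
    (es.foldl pvStepB (p, out, chg, rU, cU, bU)).1 = (procS p chg es).1 ∧
    (es.foldl pvStepB (p, out, chg, rU, cU, bU)).2.1 = out ++ (procS p chg es).2.2.1 ∧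
    (es.foldl pvStepB (p, out, chg, rU, cU, bU)).2.2.1 = (procS p chg es).2.2.2.2
  | [], p, out, chg, rU, cU, bU, _, _, _, _, _, _ => by simp [procS]
  | ⟨y, x, cand⟩ :: es, p, out, chg, rU, cU, bU, hp, hr, hcI, hb, hok, hnd => by
    obtain ⟨hy0, hy9, hx0, hx9, hcell, hdot⟩ := hok _ (List.mem_cons_self)
    have hkey_es : (y, x) ∉ es.map (fun t => (t.1, t.2.1)) := (List.nodup_cons.mp hnd).1
    have hnd' := (List.nodup_cons.mp hnd).2
    have hok' : ∀ t ∈ es, EntOK p t := fun t ht => hok t (List.mem_cons_of_mem _ ht)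
    simp only [List.foldl_cons, pvStepB]
    rw [diff3_eq cand p rU cU bU y x hp hr hcI hb hy0 hy9 hx0 hx9 hcell]
    simp only [procS]
    by_cases hc : (PySem.Set.diff cand (pvInfl p y x)).length = 1
    · rw [if_pos ((len_beq _).mpr hc), if_pos ((len_beq _).mpr hc)]
      set v := PySem.List.pyGetD (PySem.Set.diff cand (pvInfl p y x)) 0 "" with hv
      have hvmem : v ∈ PySem.Set.diff cand (pvInfl p y x) := pv_get0_mem _ hc
      have hvcand : v ∈ cand := by
        have := (PySem.Set.mem_diff cand (pvInfl p y x) v).mp hvmem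
        exact this.1
      have hvne : v ≠ "." := fun h => hdot (h ▸ hvcand)
      have hp2 : PuzInv (pvSetCell p y x v) := puzInv_setCell p v y x hp hy0 hy9 hx0
      have hr2 := rowInv_update p rU y x v hp hr hy0 hy9 hx0 hx9 hcell hvne
      have hc2 := colInv_update p cU y x v hp hcI hy0 hy9 hx0 hx9 hcell hvne
      have hb2 := boxInv_update p bU y x v hp hb hy0 hy9 hx0 hx9 hcell hvne
      have hok2 : ∀ t ∈ es, EntOK (pvSetCell p y x v) t := by
        intro t ht
        obtain ⟨h1, h2, h3, h4, h5, h6⟩ := hok' t ht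
        refine ⟨h1, h2, h3, h4, ?_, h6⟩
        have hne : ¬(t.1 = y ∧ t.2.1 = x) := by
          rintro ⟨e1, e2⟩
          refine hkey_es ?_
          have he : (t.1, t.2.1) = (y, x) := by rw [e1, e2]
          exact he ▸ List.mem_map_of_mem ht
        rw [cell_setCell p v y x t.1 t.2.1 hp hy0 hy9 hx0 hx9 h1 h2 h3 h4, if_neg hne]
        exact h5
      have ih := foldB_eq es (pvSetCell p y x v) out true _ _ _ hp2 hr2 hc2 hb2 hok2 hnd'
      exact ⟨ih.1, ih.2.1, ih.2.2⟩
    · rw [if_neg (fun h => hc ((len_beq _).mp h)), if_neg (fun h => hc ((len_beq _).mp h))]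
      have ih := foldB_eq es p (out ++ [(y, x, PySem.Set.diff cand (pvInfl p y x))]) chg rU cU bU
        hp hr hcI hb hok' hnd'
      refine ⟨ih.1, ?_, ih.2.2⟩
      rw [ih.2.1, List.append_assoc]
      simp

-- ---------- the verdict ----------

theorem single_candidate_spec : Claim_equal_single_candidate := by
  intro puzzle candidates changed hdom hpre
  by_cases hemp : candidates = []
  · subst hemp
    unfold Spec_single_candidate single_candidate single_candidate_alt
    rfl
  · obtain ⟨hlen, hrows, hent, hnd⟩ := hpre.resolve_left hemp
    have hp : PuzInv puzzle := ⟨hlen, hrows⟩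
    have hEnt : ∀ t ∈ candidates, EntOK puzzle t := by
      intro t ht
      obtain ⟨h1, h2, h3, h4, h5, h6⟩ := hent t ht
      exact ⟨h1, h2, h3, h4, by rw [pvCell_getD _ _ _ h1 h3]; exact h5, h6⟩
    have hreshkeys : ((candidates.map pvResh).map (fun e => e.1))
        = candidates.map (fun t => (t.1, t.2.1)) := by
      rw [List.map_map]; rfl
    have hofl : PySem.Dict.ofList (candidates.map (fun t => ((t.1, t.2.1), t.2.2)))
        = PySem.Dict.mk (candidates.map pvResh) := by
      have hresh : candidates.map (fun t => ((t.1, t.2.1), t.2.2)) = candidates.map pvResh := rfl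
      rw [hresh, ofList_eq_mk _ (by rw [hreshkeys]; exact hnd)]
    unfold Spec_single_candidate single_candidate single_candidate_alt
    rw [hofl, if_neg hemp]
    show ((List.foldl pvStepA (puzzle, PySem.Dict.mk (List.map pvResh candidates), changed, [])
            ((PySem.Dict.mk (List.map pvResh candidates)).keys)).1,
          List.map (fun e => (e.1.1, e.1.2, e.2))
            (List.foldl PySem.Dict.erase
              (List.foldl pvStepA (puzzle, PySem.Dict.mk (List.map pvResh candidates), changed, [])
                ((PySem.Dict.mk (List.map pvResh candidates)).keys)).2.1
              (List.foldl pvStepA (puzzle, PySem.Dict.mk (List.map pvResh candidates), changed, [])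
                ((PySem.Dict.mk (List.map pvResh candidates)).keys)).2.2.2).items,
          (List.foldl pvStepA (puzzle, PySem.Dict.mk (List.map pvResh candidates), changed, [])
            ((PySem.Dict.mk (List.map pvResh candidates)).keys)).2.2.1)
        = ((List.foldl pvStepB (puzzle, [], changed, pvRowUsed puzzle, pvColUsed puzzle,
              pvBoxUsed puzzle) candidates).1,
           (List.foldl pvStepB (puzzle, [], changed, pvRowUsed puzzle, pvColUsed puzzle,
              pvBoxUsed puzzle) candidates).2.1,
           (List.foldl pvStepB (puzzle, [], changed, pvRowUsed puzzle, pvColUsed puzzle,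
              pvBoxUsed puzzle) candidates).2.2.1)
    have hkeys : (PySem.Dict.mk (candidates.map pvResh)).keys
        = candidates.map (fun t => (t.1, t.2.1)) := by
      simp only [PySem.Dict.keys, PySem.Dict.items]
      rw [List.map_map]; rfl
    rw [hkeys]
    have hA := foldA_eq candidates [] puzzle changed [] (by simp) hnd
    rw [List.nil_append] at hA
    rw [hA, List.nil_append]
    have hB := foldB_eq candidates puzzle [] changed
      (pvRowUsed puzzle) (pvColUsed puzzle) (pvBoxUsed puzzle)
      hp (rowInv_init _ hp) (colInv_init _ hp) (boxInv_init _ hp) hEnt hnd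
    obtain ⟨hB1, hB2, hB3⟩ := hB
    rw [hB1, hB2, hB3, List.nil_append]
    rw [erase_foldl]
    have hkept := procS_kept_filter candidates puzzle changed hnd
    have hfil : (((procS puzzle changed candidates).2.1.map pvResh).filter
          (fun e => !((procS puzzle changed candidates).2.2.2.1.contains e.1)))
        = ((procS puzzle changed candidates).2.1.filter
            (fun t => !((procS puzzle changed candidates).2.2.2.1.contains (t.1, t.2.1)))).map pvResh := by
      rw [List.filter_map]; rfl
    simp only [PySem.Dict.items]
    rw [hfil, ← hkept, List.map_map]
    have hid : ((fun e : (Int × Int) × List String => (e.1.1, e.1.2, e.2)) ∘ pvResh)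
        = id := rfl
    rw [hid, List.map_id, List.nil_append]
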